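-- pv_equiv track=rewrite | github.com/Aavik743/Daily_Practice | List/array_pair_sum.py | array_pair_sum2
-- ===== SOURCE A (Python) =====
-- def array_pair_sum2(inp_arr, target_sum):
--     if len(inp_arr) < 2:
--         return
--     seen = set()
--     output = set()
--     for num in inp_arr:
--         target = target_sum - num
--         if target not in seen:
--             seen.add(num)
--         else:
--             output.add((min(target,num), max(target,num)))
--     return len(output)
-- ===== SOURCE B (Python) =====
-- def array_pair_sum2(inp_arr, target_sum):
--     if len(inp_arr) < 2:
--         return None
--     vals = set(inp_arr)
--     cnt = 0
--     for x in vals: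
--         y = target_sum - x
--         if y in vals and (x < y or (x == y and inp_arr.count(x) > 1)):
--             cnt += 1
--     return cnt
-- ===== Notes on version B (the rewrite author's own statement) =====
-- stated objective: alternative
-- what changed: B replaces A's one-pass seen/output pair-set construction with a direct count over the distinct values: x is counted iff target_sum-x is also present and either x < target_sum-x, or x equals its complement and occurs at least twice.
import Mathlib
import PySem

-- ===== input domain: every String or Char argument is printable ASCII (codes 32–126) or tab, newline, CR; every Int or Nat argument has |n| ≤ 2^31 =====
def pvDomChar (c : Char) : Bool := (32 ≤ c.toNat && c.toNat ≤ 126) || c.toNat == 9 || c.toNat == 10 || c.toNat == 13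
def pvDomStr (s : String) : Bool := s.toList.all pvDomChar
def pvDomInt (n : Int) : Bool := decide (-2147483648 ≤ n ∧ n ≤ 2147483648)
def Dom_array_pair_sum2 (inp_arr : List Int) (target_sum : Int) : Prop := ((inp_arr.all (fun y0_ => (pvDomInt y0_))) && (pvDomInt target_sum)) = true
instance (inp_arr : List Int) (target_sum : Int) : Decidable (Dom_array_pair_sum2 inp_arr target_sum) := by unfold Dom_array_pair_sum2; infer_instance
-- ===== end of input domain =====

-- B counts, over the distinct values, those x whose complement target_sum-x is present
-- (pairing each unordered pair once via x < y, and x = y only when x occurs twice),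
-- instead of A's one-pass construction of a set of (min,max) pairs.  Objective: alternative.

-- ===== PORT A =====
def apsStep (target_sum : Int) (st : PySem.Set Int × PySem.Set (Int × Int)) (num : Int) :
    PySem.Set Int × PySem.Set (Int × Int) :=
  let target := target_sum - num
  if !PySem.Set.contains st.1 target then
    (PySem.Set.add st.1 num, st.2)
  else
    (st.1, PySem.Set.add st.2 (min target num, max target num))

def array_pair_sum2 (inp_arr : List Int) (target_sum : Int) : Option Int :=
  if inp_arr.length < 2 then none
  else
    let st := inp_arr.foldl (apsStep target_sum) (PySem.Set.empty, PySem.Set.empty)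
    some (PySem.Set.len st.2)

-- ===== PORT B =====
def array_pair_sum2_alt (inp_arr : List Int) (target_sum : Int) : Option Int :=
  if inp_arr.length < 2 then none
  else
    let vals : PySem.Set Int := PySem.Set.ofList inp_arr
    some (vals.foldl (fun cnt x =>
      let y := target_sum - x
      if PySem.Set.contains vals y &&
          (decide (x < y) || (x == y && decide (1 < PySem.List.count inp_arr x))) then
        cnt + 1
      else cnt) 0)

-- ===== PRECONDITION & SPEC =====
def Spec_array_pair_sum2 (inp_arr : List Int) (target_sum : Int) (out : Option Int) : Prop := out = array_pair_sum2_alt inp_arr target_sum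
instance (inp_arr : List Int) (target_sum : Int) (out : Option Int) : Decidable (Spec_array_pair_sum2 inp_arr target_sum out) := by unfold Spec_array_pair_sum2; infer_instance

-- ===== CLAIM (what is proved, stated in full; the proofs are below) =====
def Claim_equal_array_pair_sum2 : Prop := ∀ (inp_arr : List Int) (target_sum : Int), Dom_array_pair_sum2 inp_arr target_sum → Spec_array_pair_sum2 inp_arr target_sum (array_pair_sum2 inp_arr target_sum)

-- ===== LEMMAS AND PROOFS =====

-- Invariant of A's loop after the prefix p has been processed.
def apsInv (t : Int) (p : List Int) (seen : List Int) (output : List (Int × Int)) : Prop :=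
  output.Nodup ∧
  (∀ x ∈ seen, x ∈ p) ∧
  (∀ x ∈ p, x ∈ seen ∨ (min (t - x) x, max (t - x) x) ∈ output) ∧
  (∀ ab ∈ output, ab.1 ≤ ab.2 ∧ ab.1 + ab.2 = t ∧ ab.1 ∈ p ∧ ab.2 ∈ p ∧
      (ab.1 = ab.2 → 2 ≤ p.count ab.1)) ∧
  (∀ a b : Int, a ≤ b → a + b = t → a ∈ p → b ∈ p → (a = b → 2 ≤ p.count a) →
      (a, b) ∈ output)

theorem apsInv_step (t : Int) (p seen : List Int) (output : List (Int × Int)) (num : Int)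
    (h : apsInv t p seen output) :
    apsInv t (p ++ [num]) ((apsStep t (seen, output) num).1) ((apsStep t (seen, output) num).2) := by
  obtain ⟨hnd, h2, h3, h4, h5⟩ := h
  have hcount : ∀ a : Int, (p ++ [num]).count a = p.count a + (if num = a then 1 else 0) := by
    intro a
    simp [List.count_append, List.count_singleton']
  have hpe : ∀ a b : Int, a ≤ b → a + b = t → (min (t - b) b, max (t - b) b) = (a, b) := by
    intro a b h1 h2'
    exact Prod.ext (by omega) (by omega)
  have hpe' : ∀ a b : Int, a ≤ b → a + b = t → (min (t - a) a, max (t - a) a) = (a, b) := by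
    intro a b h1 h2'
    exact Prod.ext (by omega) (by omega)
  by_cases hc : t - num ∈ seen
  · -- target in seen: pair recorded
    have hcb : PySem.Set.contains seen (t - num) = true := (PySem.Set.contains_iff _ _).2 hc
    simp only [apsStep, hcb, Bool.not_true, Bool.false_eq_true, if_false]
    refine ⟨PySem.Set.nodup_add _ _ hnd, ?_, ?_, ?_, ?_⟩
    · intro x hx
      exact List.mem_append_left _ (h2 x hx)
    · intro x hx
      rcases List.mem_append.1 hx with hxp | hxn
      · rcases h3 x hxp with hs | ho
        · exact Or.inl hs
        · exact Or.inr ((PySem.Set.mem_add _ _ _).2 (Or.inl ho))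
      · rw [List.mem_singleton.1 hxn]
        exact Or.inr ((PySem.Set.mem_add _ _ _).2 (Or.inr rfl))
    · intro ab hab
      rcases (PySem.Set.mem_add _ _ _).1 hab with ho | hnew
      · obtain ⟨hle, hsum, hm1, hm2, hdup⟩ := h4 ab ho
        refine ⟨hle, hsum, List.mem_append_left _ hm1, List.mem_append_left _ hm2, ?_⟩
        intro he
        have := hdup he
        rw [hcount]
        omega
      · have hmemp : t - num ∈ p := h2 _ hc
        subst hnew
        refine ⟨by omega, by omega, ?_, ?_, ?_⟩
        · rcases le_total (t - num) num with hmn | hmn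
          · rw [min_eq_left hmn]; exact List.mem_append_left _ hmemp
          · rw [min_eq_right hmn]; exact List.mem_append_right _ (List.mem_singleton.2 rfl)
        · rcases le_total (t - num) num with hmn | hmn
          · rw [max_eq_right hmn]; exact List.mem_append_right _ (List.mem_singleton.2 rfl)
          · rw [max_eq_left hmn]; exact List.mem_append_left _ hmemp
        · intro he
          have hnn : t - num = num := by omega
          rw [hnn] at hmemp
          have hpos : 0 < p.count num := List.count_pos_iff.2 hmemp
          simp only [hnn, min_self]
          rw [hcount]
          split_ifs with h'' <;> omega
    · intro a b hle hsum ha hb hdup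
      rcases List.mem_append.1 ha with hap | han
      · rcases List.mem_append.1 hb with hbp | hbn
        · by_cases hab : a = b
          · subst hab
            by_cases h2c : 2 ≤ p.count a
            · exact (PySem.Set.mem_add _ _ _).2 (Or.inl (h5 a a hle hsum hap hbp (fun _ => h2c)))
            · have hna : num = a := by
                have := hdup rfl
                have := hcount a
                split_ifs at this <;> omega
              refine (PySem.Set.mem_add _ _ _).2 (Or.inr ?_)
              rw [hna]
              exact (hpe' a a hle hsum).symm
          · exact (PySem.Set.mem_add _ _ _).2
              (Or.inl (h5 a b hle hsum hap hbp (fun h => absurd h hab)))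
        · -- b = num
          have hbn' : b = num := List.mem_singleton.1 hbn
          subst hbn'
          by_cases hab : a = b
          · subst hab
            -- a = b = num, need num twice in p ++ [num]
            have hpos : 0 < p.count a := by
              have := hdup rfl
              have := hcount a
              split_ifs at this <;> omega
            have hap' : a ∈ p := List.count_pos_iff.1 hpos
            refine (PySem.Set.mem_add _ _ _).2 (Or.inr ?_)
            exact (hpe' a a hle hsum).symm
          · refine (PySem.Set.mem_add _ _ _).2 (Or.inr ?_)
            exact (hpe a b hle hsum).symm
      · -- a = num
        have han' : a = num := List.mem_singleton.1 han
        subst han'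
        rcases List.mem_append.1 hb with hbp | hbn
        · refine (PySem.Set.mem_add _ _ _).2 (Or.inr ?_)
          exact (hpe' a b hle hsum).symm
        · -- a = b = num
          have hbn' : b = a := (List.mem_singleton.1 hbn).symm ▸ rfl
          have hab : a = b := ((List.mem_singleton.1 hbn)).symm
          subst hab
          refine (PySem.Set.mem_add _ _ _).2 (Or.inr ?_)
          exact (hpe' a a hle hsum).symm
  · -- target not in seen: num added to seen
    have hcb : PySem.Set.contains seen (t - num) = false := by
      rw [← Bool.not_eq_true]
      intro hcon
      exact hc ((PySem.Set.contains_iff _ _).1 hcon)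
    simp only [apsStep, hcb, Bool.not_false, if_true]
    refine ⟨hnd, ?_, ?_, ?_, ?_⟩
    · intro x hx
      rcases (PySem.Set.mem_add _ _ _).1 hx with hs | rfl
      · exact List.mem_append_left _ (h2 x hs)
      · exact List.mem_append_right _ (List.mem_singleton.2 rfl)
    · intro x hx
      rcases List.mem_append.1 hx with hxp | hxn
      · rcases h3 x hxp with hs | ho
        · exact Or.inl ((PySem.Set.mem_add _ _ _).2 (Or.inl hs))
        · exact Or.inr ho
      · rw [List.mem_singleton.1 hxn]
        exact Or.inl ((PySem.Set.mem_add _ _ _).2 (Or.inr rfl))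
    · intro ab hab
      obtain ⟨hle, hsum, hm1, hm2, hdup⟩ := h4 ab hab
      refine ⟨hle, hsum, List.mem_append_left _ hm1, List.mem_append_left _ hm2, ?_⟩
      intro he
      have := hdup he
      rw [hcount]
      omega
    · intro a b hle hsum ha hb hdup
      -- helper: x in p with t - x = num-complement matching
      rcases List.mem_append.1 ha with hap | han
      · rcases List.mem_append.1 hb with hbp | hbn
        · by_cases hab : a = b
          · subst hab
            by_cases h2c : 2 ≤ p.count a
            · exact h5 a a hle hsum hap hbp (fun _ => h2c)
            · have hna : num = a := by
                have := hdup rfl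
                have := hcount a
                split_ifs at this <;> omega
              -- t = 2a, num = a, so t - num = a ∉ seen; a ∈ p gives pairOf a ∈ output
              rcases h3 a hap with hs | ho
              · exact absurd (show t - num ∈ seen by rw [hna]; simpa [show t - a = a by omega] using hs) hc
              · rw [← hpe' a a hle hsum]; exact ho
          · exact h5 a b hle hsum hap hbp (fun h => absurd h hab)
        · -- b = num, a ∈ p, t - num = a (if a ≠ b) — a in seen would contradict hc
          have hbn' : b = num := List.mem_singleton.1 hbn
          by_cases hab : a = b
          · subst hab
            subst hbn'
            have hpos : 0 < p.count a := by
              have := hdup rfl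
              have := hcount a
              split_ifs at this <;> omega
            have hap' : a ∈ p := List.count_pos_iff.1 hpos
            rcases h3 a hap' with hs | ho
            · exact absurd (show t - a ∈ seen by simpa [show t - a = a by omega] using hs) hc
            · rw [← hpe' a a hle hsum]; exact ho
          · subst hbn'
            have hta : t - a = b := by omega
            rcases h3 a hap with hs | ho
            · exact absurd (show t - b ∈ seen by simpa [show t - b = a by omega] using hs) hc
            · rw [← hpe' a b hle hsum]; exact ho
      · -- a = num
        have han' : a = num := List.mem_singleton.1 han
        rcases List.mem_append.1 hb with hbp | hbn
        · subst han'
          rcases h3 b hbp with hs | ho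
          · exact absurd (show t - a ∈ seen by simpa [show t - a = b by omega] using hs) hc
          · rw [← hpe a b hle hsum]; exact ho
        · -- a = b = num
          have hbn' : b = num := List.mem_singleton.1 hbn
          have hab : a = b := by rw [han', hbn']
          subst hab
          subst han'
          have hpos : 0 < p.count a := by
            have := hdup rfl
            have := hcount a
            split_ifs at this; omega
          have hap' : a ∈ p := List.count_pos_iff.1 hpos
          rcases h3 a hap' with hs | ho
          · exact absurd (show t - a ∈ seen by simpa [show t - a = a by omega] using hs) hc
          · rw [← hpe' a a hle hsum]; exact ho

theorem apsInv_foldl (t : Int) (l p seen : List Int) (output : List (Int × Int))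
    (h : apsInv t p seen output) :
    apsInv t (p ++ l) ((l.foldl (apsStep t) (seen, output)).1)
      ((l.foldl (apsStep t) (seen, output)).2) := by
  induction l generalizing p seen output with
  | nil => simpa using h
  | cons num rest ih =>
    have h1 := apsInv_step t p seen output num h
    have := ih (p ++ [num]) ((apsStep t (seen, output) num).1)
      ((apsStep t (seen, output) num).2) h1
    simpa [List.foldl_cons, List.append_assoc] using this

-- B's per-element test, as a Bool predicate.
def apsQ (l : List Int) (t : Int) (x : Int) : Bool :=
  PySem.Set.contains (PySem.Set.ofList l) (t - x) &&
    (decide (x < t - x) || (x == t - x && decide (1 < PySem.List.count l x)))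

theorem aps_output_length (l : List Int) (t : Int) (output : List (Int × Int))
    (h : apsInv t l ((l.foldl (apsStep t) (PySem.Set.empty, PySem.Set.empty)).1) output) :
    output.length = (PySem.Set.ofList l).countP (apsQ l t) := by
  obtain ⟨hnd, -, -, h4, h5⟩ := h
  have hmnd : (output.map Prod.fst).Nodup := by
    refine hnd.map_on ?_
    intro ab hab ab' hab' hfst
    obtain ⟨-, hsum, -, -, -⟩ := h4 ab hab
    obtain ⟨-, hsum', -, -, -⟩ := h4 ab' hab'
    exact Prod.ext hfst (by omega)
  have hfnd : ((PySem.Set.ofList l).filter (apsQ l t)).Nodup :=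
    (PySem.Set.nodup_ofList l).filter _
  have hmem : ∀ x : Int,
      x ∈ output.map Prod.fst ↔ x ∈ (PySem.Set.ofList l).filter (apsQ l t) := by
    intro x
    constructor
    · intro hx
      obtain ⟨ab, hab, rfl⟩ := List.mem_map.1 hx
      obtain ⟨hle, hsum, hm1, hm2, hdup⟩ := h4 ab hab
      have hb : ab.2 = t - ab.1 := by omega
      refine List.mem_filter.2 ⟨(PySem.Set.mem_ofList _ _).2 hm1, ?_⟩
      simp only [apsQ, Bool.and_eq_true, Bool.or_eq_true, decide_eq_true_eq, beq_iff_eq,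
        PySem.Set.contains_iff, PySem.Set.mem_ofList, PySem.List.count_eq]
      refine ⟨by rw [← hb]; exact hm2, ?_⟩
      rcases lt_or_eq_of_le hle with hlt | heq
      · exact Or.inl (by omega)
      · exact Or.inr ⟨by omega, by have := hdup heq; omega⟩
    · intro hx
      obtain ⟨hxl, hq⟩ := List.mem_filter.1 hx
      simp only [apsQ, Bool.and_eq_true, Bool.or_eq_true, decide_eq_true_eq, beq_iff_eq,
        PySem.Set.contains_iff, PySem.Set.mem_ofList, PySem.List.count_eq] at hq
      obtain ⟨hc, hd⟩ := hq
      have hxl' : x ∈ l := (PySem.Set.mem_ofList _ _).1 hxl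
      have hpair : (x, t - x) ∈ output := by
        rcases hd with hlt | ⟨heq, hcnt⟩
        · exact h5 x (t - x) (by omega) (by omega) hxl' hc (fun hcon => by omega)
        · exact h5 x (t - x) (by omega) (by omega) hxl' hc (fun _ => by omega)
      exact List.mem_map.2 ⟨(x, t - x), hpair, rfl⟩
  have hperm := (List.perm_ext_iff_of_nodup hmnd hfnd).2 hmem
  calc output.length = (output.map Prod.fst).length := (List.length_map _).symm
    _ = ((PySem.Set.ofList l).filter (apsQ l t)).length := hperm.length_eq
    _ = (PySem.Set.ofList l).countP (apsQ l t) := List.countP_eq_length_filter.symm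

-- ===== VERDICT (by name: the statement is the Claim_ definition above) =====
theorem array_pair_sum2_spec : Claim_equal_array_pair_sum2 := by
  intro l t _
  unfold Spec_array_pair_sum2 array_pair_sum2 array_pair_sum2_alt
  by_cases hlen : l.length < 2
  · simp [hlen]
  · simp only [hlen, if_false]
    have hbase : apsInv t [] [] [] := by
      refine ⟨List.nodup_nil, ?_, ?_, ?_, ?_⟩ <;> simp
    have hinv := apsInv_foldl t l [] [] [] hbase
    simp only [List.nil_append] at hinv
    have hlenq := aps_output_length l t _ hinv
    have hB := PySem.List.foldl_if_add_one (apsQ l t) (PySem.Set.ofList l) 0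
    rw [show (fun (cnt : Int) (x : Int) =>
        let y := t - x
        if PySem.Set.contains (PySem.Set.ofList l) y &&
            (decide (x < y) || (x == y && decide (1 < PySem.List.count l x))) then
          cnt + 1
        else cnt) = (fun acc x => if apsQ l t x then acc + 1 else acc) from rfl, hB]
    simp [PySem.Set.len, hlenq]
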